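-- pv_equiv track=rewrite | github.com/Xbectordash/Capital_one_hacathon | agent-python/src/data/government_schemes_plugin.py | generate_scheme_recommendations
-- ===== SOURCE A (Python) =====
-- from typing import Dict, List, Optional
--
-- def generate_scheme_recommendations(schemes: List[Dict], farmer_profile: Dict) -> List[str]:
--     """Generate personalized recommendations."""
--     recommendations = []
--
--     if len(schemes) > 0:
--         top_scheme = schemes[0]
--         recommendations.append(f"Priority: Apply for {top_scheme['scheme_name']} - highest eligibility match")
--
--     # Income support recommendation
--     income_schemes = [s for s in schemes if "income" in s.get("scheme_type", "").lower()]
--     if income_schemes: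
--         recommendations.append("Consider income support schemes like PM-KISAN for regular financial assistance")
--
--     # Insurance recommendation
--     insurance_schemes = [s for s in schemes if "insurance" in s.get("scheme_type", "").lower()]
--     if insurance_schemes:
--         recommendations.append("Secure your crops with insurance schemes like PMFBY")
--
--     # Credit recommendation
--     credit_schemes = [s for s in schemes if "credit" in s.get("scheme_type", "").lower()]
--     if credit_schemes:
--         recommendations.append("Access affordable credit through KCC scheme for farming needs")
--
--     return recommendations
-- ===== SOURCE B (Python) =====
-- def generate_scheme_recommendations(schemes, farmer_profile):
--     """Generate personalized recommendations (single pass over schemes with flags)."""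
--     has_income = has_insurance = has_credit = False
--     for s in schemes:
--         t = s.get("scheme_type", "").lower()
--         if "income" in t:
--             has_income = True
--         if "insurance" in t:
--             has_insurance = True
--         if "credit" in t:
--             has_credit = True
--     recommendations = []
--     if schemes:
--         recommendations.append(f"Priority: Apply for {schemes[0]['scheme_name']} - highest eligibility match")
--     if has_income:
--         recommendations.append("Consider income support schemes like PM-KISAN for regular financial assistance")
--     if has_insurance:
--         recommendations.append("Secure your crops with insurance schemes like PMFBY")
--     if has_credit:
--         recommendations.append("Access affordable credit through KCC scheme for farming needs")
--     return recommendations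
-- ===== Notes on version B (the rewrite author's own statement) =====
-- stated objective: simpler
-- what changed: Replaces the three independent filtering list comprehensions (three scans of schemes building throwaway lists) with one loop over schemes that sets three boolean flags, then appends the recommendation strings guarded by the flags.
import Mathlib
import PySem

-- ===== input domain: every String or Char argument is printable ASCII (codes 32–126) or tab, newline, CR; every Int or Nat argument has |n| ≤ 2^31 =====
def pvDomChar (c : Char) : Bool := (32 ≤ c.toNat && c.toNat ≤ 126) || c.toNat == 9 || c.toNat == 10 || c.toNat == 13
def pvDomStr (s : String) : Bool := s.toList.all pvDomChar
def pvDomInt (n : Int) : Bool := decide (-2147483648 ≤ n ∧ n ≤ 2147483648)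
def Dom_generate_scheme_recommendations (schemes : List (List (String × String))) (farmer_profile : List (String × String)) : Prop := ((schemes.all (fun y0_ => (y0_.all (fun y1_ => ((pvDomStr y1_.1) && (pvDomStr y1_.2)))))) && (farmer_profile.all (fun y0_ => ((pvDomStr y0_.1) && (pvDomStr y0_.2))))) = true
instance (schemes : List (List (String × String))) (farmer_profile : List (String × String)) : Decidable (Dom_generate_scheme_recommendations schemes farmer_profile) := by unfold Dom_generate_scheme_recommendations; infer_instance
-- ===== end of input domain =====

-- B replaces A's three filtering passes over `schemes` with one fold maintaining three boolean flags (simpler, single scan).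


-- ===== PORT A =====
-- `s.get("scheme_type", "").lower()` followed by the `in` test, shared by both ports
def pvTypeHas (sub : String) (s : List (String × String)) : Bool :=
  PySem.Str.isIn sub (PySem.Str.lower ((PySem.Dict.mk s).getD "scheme_type" ""))

def generate_scheme_recommendations (schemes : List (List (String × String))) (farmer_profile : List (String × String)) : List String :=
  let recommendations : List String := []
  let recommendations :=
    if schemes.length > 0 then
      let top_scheme := PySem.Dict.mk (schemes.headD [])
      -- top_scheme["scheme_name"]: KeyError (= none) is excluded by Pre_
      recommendations ++ ["Priority: Apply for " ++ ((top_scheme.get? "scheme_name").getD "") ++ " - highest eligibility match"]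
    else recommendations
  let income_schemes := schemes.filter (fun s => pvTypeHas "income" s)
  let recommendations :=
    if income_schemes.length > 0 then
      recommendations ++ ["Consider income support schemes like PM-KISAN for regular financial assistance"]
    else recommendations
  let insurance_schemes := schemes.filter (fun s => pvTypeHas "insurance" s)
  let recommendations :=
    if insurance_schemes.length > 0 then
      recommendations ++ ["Secure your crops with insurance schemes like PMFBY"]
    else recommendations
  let credit_schemes := schemes.filter (fun s => pvTypeHas "credit" s)
  let recommendations :=
    if credit_schemes.length > 0 then
      recommendations ++ ["Access affordable credit through KCC scheme for farming needs"]
    else recommendations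
  recommendations

-- ===== PORT B =====
def generate_scheme_recommendations_alt (schemes : List (List (String × String))) (farmer_profile : List (String × String)) : List String :=
  let flags := schemes.foldl
    (fun (st : Bool × Bool × Bool) s =>
      let t := PySem.Str.lower ((PySem.Dict.mk s).getD "scheme_type" "")
      (st.1 || PySem.Str.isIn "income" t,
       st.2.1 || PySem.Str.isIn "insurance" t,
       st.2.2 || PySem.Str.isIn "credit" t))
    (false, false, false)
  let recommendations : List String := []
  let recommendations :=
    if !schemes.isEmpty then
      recommendations ++ ["Priority: Apply for " ++ (((PySem.Dict.mk (schemes.headD [])).get? "scheme_name").getD "") ++ " - highest eligibility match"]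
    else recommendations
  let recommendations :=
    if flags.1 then
      recommendations ++ ["Consider income support schemes like PM-KISAN for regular financial assistance"]
    else recommendations
  let recommendations :=
    if flags.2.1 then
      recommendations ++ ["Secure your crops with insurance schemes like PMFBY"]
    else recommendations
  let recommendations :=
    if flags.2.2 then
      recommendations ++ ["Access affordable credit through KCC scheme for farming needs"]
    else recommendations
  recommendations

-- ===== PRECONDITION & SPEC =====
-- Pre_ excludes exactly the inputs where A raises KeyError: a nonempty scheme list whose first dict lacks "scheme_name".
def Pre_generate_scheme_recommendations (schemes : List (List (String × String))) (farmer_profile : List (String × String)) : Prop :=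
  schemes = [] ∨ (PySem.Dict.mk (schemes.headD [])).contains "scheme_name" = true
instance (schemes : List (List (String × String))) (farmer_profile : List (String × String)) : Decidable (Pre_generate_scheme_recommendations schemes farmer_profile) := by unfold Pre_generate_scheme_recommendations; infer_instance

def pvWitness_generate_scheme_recommendations : (List (List (String × String))) × (List (String × String)) :=
  ([[("scheme_name", "PM-KISAN"), ("scheme_type", "Income Support")]], [("state", "UP")])

def Spec_generate_scheme_recommendations (schemes : List (List (String × String))) (farmer_profile : List (String × String)) (out : List String) : Prop := out = generate_scheme_recommendations_alt schemes farmer_profile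
instance (schemes : List (List (String × String))) (farmer_profile : List (String × String)) (out : List String) : Decidable (Spec_generate_scheme_recommendations schemes farmer_profile out) := by unfold Spec_generate_scheme_recommendations; infer_instance

-- ===== CLAIM (what is proved, stated in full; the proofs are below) =====
def Claim_equal_generate_scheme_recommendations : Prop := ∀ (schemes : List (List (String × String))) (farmer_profile : List (String × String)), Dom_generate_scheme_recommendations schemes farmer_profile → Pre_generate_scheme_recommendations schemes farmer_profile → Spec_generate_scheme_recommendations schemes farmer_profile (generate_scheme_recommendations schemes farmer_profile)

-- ===== LEMMAS AND PROOFS =====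
-- B's fold computes (any "income", any "insurance", any "credit") over the schemes.
theorem pv_fold_eq_any (l : List (List (String × String))) (a b c : Bool) :
    l.foldl
      (fun (st : Bool × Bool × Bool) s =>
        let t := PySem.Str.lower ((PySem.Dict.mk s).getD "scheme_type" "")
        (st.1 || PySem.Str.isIn "income" t,
         st.2.1 || PySem.Str.isIn "insurance" t,
         st.2.2 || PySem.Str.isIn "credit" t))
      (a, b, c)
    = (a || l.any (fun s => pvTypeHas "income" s),
       b || l.any (fun s => pvTypeHas "insurance" s),
       c || l.any (fun s => pvTypeHas "credit" s)) := by
  induction l generalizing a b c with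
  | nil => simp
  | cons hd tl ih =>
    simp only [List.foldl_cons, List.any_cons, ih, pvTypeHas]
    simp [Bool.or_assoc]

theorem pv_filter_pos_iff {α : Type} (l : List α) (p : α → Bool) :
    (0 < (l.filter p).length) ↔ l.any p = true := by
  rcases h : l.any p with _ | _
  · simp only [List.any_eq_false] at h
    have : l.filter p = [] := List.filter_eq_nil_iff.mpr h
    simp [this]
  · rw [List.any_eq_true] at h
    obtain ⟨x, hx, hp⟩ := h
    have : x ∈ l.filter p := List.mem_filter.mpr ⟨hx, hp⟩
    simp [List.length_pos_iff, List.ne_nil_of_mem this]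

-- ===== VERDICT (by name: the statement is the Claim_ definition above) =====
theorem generate_scheme_recommendations_spec : Claim_equal_generate_scheme_recommendations := by
  intro schemes farmer_profile _ _
  unfold Spec_generate_scheme_recommendations generate_scheme_recommendations generate_scheme_recommendations_alt
  simp only [pv_fold_eq_any, Bool.false_or]
  have hlen : 0 < schemes.length ↔ (!schemes.isEmpty) = true := by cases schemes <;> simp
  simp only [gt_iff_lt, pv_filter_pos_iff, hlen]
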